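-- pv_equiv track=rewrite | github.com/suphiro-arch/NA-kunnskap | web/hugo-prototype/scripts/generate-capabilities.py | simplify_capability_relevance
-- ===== SOURCE A (Python) =====
-- def simplify_capability_relevance(explanations: list[str], via_names: list[str]) -> str:
--     cleaned = []
--     for explanation in explanations:
--         text = explanation.strip()
--         if text and text not in cleaned:
--             cleaned.append(text)
--
--     if len(via_names) > 1:
--         return 'Støtter flere delkapabiliteter i denne hovedkapabiliteten.'
--     if cleaned:
--         return cleaned[0]
--     return 'Produktet er eksplisitt koblet til denne kapabiliteten.'
-- ===== SOURCE B (Python) =====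
-- def simplify_capability_relevance(explanations: list[str], via_names: list[str]) -> str:
--     if len(via_names) > 1:
--         return 'Støtter flere delkapabiliteter i denne hovedkapabiliteten.'
--     for explanation in explanations:
--         text = explanation.strip()
--         if text:
--             return text
--     return 'Produktet er eksplisitt koblet til denne kapabiliteten.'
-- ===== Notes on version B (the rewrite author's own statement) =====
-- stated objective: simpler
-- what changed: Checks the via_names guard first and early-returns the first non-empty stripped explanation, eliminating A's deduplicated list, membership test and indexing entirely.
import Mathlib
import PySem

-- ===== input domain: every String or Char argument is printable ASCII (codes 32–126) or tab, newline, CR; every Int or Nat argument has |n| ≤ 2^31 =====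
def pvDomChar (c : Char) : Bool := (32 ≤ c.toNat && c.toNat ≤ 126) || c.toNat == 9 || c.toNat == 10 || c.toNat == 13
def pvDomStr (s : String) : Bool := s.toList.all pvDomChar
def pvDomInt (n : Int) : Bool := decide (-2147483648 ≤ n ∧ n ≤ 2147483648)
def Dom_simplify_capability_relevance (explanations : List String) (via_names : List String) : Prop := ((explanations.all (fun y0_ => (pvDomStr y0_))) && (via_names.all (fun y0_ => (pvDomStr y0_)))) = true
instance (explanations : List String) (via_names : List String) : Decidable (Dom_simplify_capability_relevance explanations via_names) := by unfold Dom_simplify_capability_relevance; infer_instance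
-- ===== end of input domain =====

-- B reorders the guard first and early-returns the first non-empty stripped explanation,
-- removing A's deduplicated list, membership test and indexing (objective: simpler).


-- ===== PORT A =====
-- A's loop: build `cleaned` (stripped, non-empty, deduplicated) by appending at the end.
def simplify_capability_relevance (explanations : List String) (via_names : List String) : String :=
  let cleaned := explanations.foldl (fun cleaned explanation =>
    let text := PySem.Str.strip explanation
    if text ≠ "" ∧ ¬ cleaned.contains text then cleaned ++ [text] else cleaned) []
  if via_names.length > 1 then
    "Støtter flere delkapabiliteter i denne hovedkapabiliteten."
  else
    match cleaned with
    | t :: _ => t   -- `if cleaned: return cleaned[0]`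
    | [] => "Produktet er eksplisitt koblet til denne kapabiliteten."

-- ===== PORT B =====
-- B's loop: early-return the first non-empty stripped explanation.
def pvFirstNonEmpty (explanations : List String) : String :=
  match explanations with
  | [] => "Produktet er eksplisitt koblet til denne kapabiliteten."
  | explanation :: rest =>
    let text := PySem.Str.strip explanation
    if text ≠ "" then text else pvFirstNonEmpty rest

def simplify_capability_relevance_alt (explanations : List String) (via_names : List String) : String :=
  if via_names.length > 1 then
    "Støtter flere delkapabiliteter i denne hovedkapabiliteten."
  else
    pvFirstNonEmpty explanations

-- ===== PRECONDITION & SPEC =====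
def Spec_simplify_capability_relevance (explanations : List String) (via_names : List String) (out : String) : Prop := out = simplify_capability_relevance_alt explanations via_names
instance (explanations : List String) (via_names : List String) (out : String) : Decidable (Spec_simplify_capability_relevance explanations via_names out) := by unfold Spec_simplify_capability_relevance; infer_instance

-- ===== CLAIM (what is proved, stated in full; the proofs are below) =====
def Claim_equal_simplify_capability_relevance : Prop := ∀ (explanations : List String) (via_names : List String), Dom_simplify_capability_relevance explanations via_names → Spec_simplify_capability_relevance explanations via_names (simplify_capability_relevance explanations via_names)

-- ===== LEMMAS AND PROOFS =====

-- A's fold only appends, so a non-empty accumulator keeps its head.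
theorem pvFoldA_head_cons (explanations : List String) (a : String) (acc : List String) :
    (explanations.foldl (fun cleaned explanation =>
      if PySem.Str.strip explanation ≠ "" ∧ ¬ cleaned.contains (PySem.Str.strip explanation) then
        cleaned ++ [PySem.Str.strip explanation] else cleaned) (a :: acc)).head? = some a := by
  induction explanations generalizing acc with
  | nil => rfl
  | cons e rest ih =>
    simp only [List.foldl]
    split
    · exact ih (acc ++ [PySem.Str.strip e])
    · exact ih acc

-- From the empty accumulator, the head of A's `cleaned` is B's first non-empty stripped text.
theorem pvFoldA_head_nil (explanations : List String) :
    (explanations.foldl (fun cleaned explanation =>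
      if PySem.Str.strip explanation ≠ "" ∧ ¬ cleaned.contains (PySem.Str.strip explanation) then
        cleaned ++ [PySem.Str.strip explanation] else cleaned) []).head?.getD
        "Produktet er eksplisitt koblet til denne kapabiliteten." = pvFirstNonEmpty explanations := by
  induction explanations with
  | nil => rfl
  | cons e rest ih =>
    simp only [List.foldl]
    rw [show (if PySem.Str.strip e ≠ "" ∧ ¬([] : List String).contains (PySem.Str.strip e) then
        ([] : List String) ++ [PySem.Str.strip e] else []) =
        (if PySem.Str.strip e ≠ "" then [PySem.Str.strip e] else []) from by simp]
    by_cases h : PySem.Str.strip e ≠ ""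
    · rw [if_pos h, pvFoldA_head_cons, pvFirstNonEmpty, if_pos h]
      rfl
    · rw [if_neg h, pvFirstNonEmpty, if_neg h]
      exact ih

-- ===== VERDICT (by name: the statement is the Claim_ definition above) =====
theorem simplify_capability_relevance_spec : Claim_equal_simplify_capability_relevance := by
  intro explanations via_names _
  simp only [Spec_simplify_capability_relevance, simplify_capability_relevance,
    simplify_capability_relevance_alt]
  split
  · rfl
  · have h := pvFoldA_head_nil explanations
    cases hc : explanations.foldl (fun cleaned explanation =>
      if PySem.Str.strip explanation ≠ "" ∧ ¬ cleaned.contains (PySem.Str.strip explanation) then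
        cleaned ++ [PySem.Str.strip explanation] else cleaned) [] with
    | nil => rw [hc] at h; simpa using h
    | cons t rest => rw [hc] at h; simpa using h
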